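-- pv_equiv track=rewrite | github.com/Itaymizik/RecSys---CORE | dataset/convert_eshop2008.py | obtain_train
-- ===== SOURCE A (Python) =====
-- def obtain_train(train_sess, sess_clicks):
--     item_dict = {}
--     item_ctr = 1
--
--     train_dates = []
--     train_seqs = []
--     for s, date in train_sess:
--         seq = sess_clicks[s]
--         outseq = []
--         for i in seq:
--             if i not in item_dict:
--                 item_dict[i] = item_ctr
--                 item_ctr += 1
--             outseq.append(item_dict[i])
--         if len(outseq) >= 2:
--             train_dates.append(date)
--             train_seqs.append(outseq)
--     return train_dates, train_seqs, item_dict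
-- ===== SOURCE B (Python) =====
-- def obtain_train(train_sess, sess_clicks):
--     # Pass 1: assign first-appearance IDs over all training sessions (filtering
--     # does not affect numbering in the original, so none is applied here).
--     item_dict = {}
--     item_ctr = 1
--     for s, _date in train_sess:
--         for i in sess_clicks[s]:
--             if i not in item_dict:
--                 item_dict[i] = item_ctr
--                 item_ctr += 1
--     # Pass 2: remap each session through the completed dictionary and keep
--     # only sessions with at least two clicks.
--     train_dates = []
--     train_seqs = []
--     for s, date in train_sess:
--         outseq = [item_dict[i] for i in sess_clicks[s]]
--         if len(outseq) >= 2: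
--             train_dates.append(date)
--             train_seqs.append(outseq)
--     return train_dates, train_seqs, item_dict
-- ===== Notes on version B (the rewrite author's own statement) =====
-- stated objective: simpler
-- what changed: A interleaves ID assignment, remapping and filtering in one pass over the sessions; B splits it into two plain passes: a first pass that only assigns first-appearance IDs (no filtering, preserving A's numbering including items of soon-to-be-dropped sessions) and a second pass that maps each session through the completed dictionary and keeps only sessions of length >= 2.
-- outside the precondition, e.g. on obtain_train([(0, 5)], {1: [2, 3]}): A raises KeyError, B raises KeyError
import Mathlib
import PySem

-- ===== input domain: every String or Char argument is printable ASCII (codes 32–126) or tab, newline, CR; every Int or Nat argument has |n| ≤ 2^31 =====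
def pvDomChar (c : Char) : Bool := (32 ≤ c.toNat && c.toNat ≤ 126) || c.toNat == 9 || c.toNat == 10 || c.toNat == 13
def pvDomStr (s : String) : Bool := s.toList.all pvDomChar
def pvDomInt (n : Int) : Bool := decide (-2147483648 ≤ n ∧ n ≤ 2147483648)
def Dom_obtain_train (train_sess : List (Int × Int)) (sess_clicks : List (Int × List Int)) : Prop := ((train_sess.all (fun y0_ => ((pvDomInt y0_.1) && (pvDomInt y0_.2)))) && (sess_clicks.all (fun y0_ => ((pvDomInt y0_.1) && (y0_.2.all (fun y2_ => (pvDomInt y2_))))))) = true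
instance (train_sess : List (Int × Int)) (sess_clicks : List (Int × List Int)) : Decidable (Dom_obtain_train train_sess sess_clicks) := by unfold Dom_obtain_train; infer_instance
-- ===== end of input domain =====

-- B replaces A's single filtering pass (which interleaves ID assignment with output
-- building) by two plain passes: pass 1 assigns all first-appearance IDs, pass 2 maps
-- sessions through the finished dictionary and filters; objective: simpler.

-- ===== PORT A =====
-- inner loop body of A: state = (item_dict, item_ctr, outseq).
-- item_dict[i] after the conditional insert always succeeds, so getD's default 0 is never used.
def pvAInner (st : PySem.Dict Int Int × Int × List Int) (i : Int) :
    PySem.Dict Int Int × Int × List Int :=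
  let dc := if st.1.contains i = false then (st.1.insert i st.2.1, st.2.1 + 1) else (st.1, st.2.1)
  (dc.1, dc.2, st.2.2 ++ [dc.1.getD i 0])

-- outer loop body of A: state = (item_dict, item_ctr, train_dates, train_seqs).
-- sess_clicks[s] would raise KeyError on a missing key; Pre_ excludes that, so getD's [] is never used.
def pvAStep (sc : PySem.Dict Int (List Int))
    (st : PySem.Dict Int Int × Int × List Int × List (List Int)) (p : Int × Int) :
    PySem.Dict Int Int × Int × List Int × List (List Int) :=
  let seq := sc.getD p.1 []
  let r := seq.foldl pvAInner (st.1, st.2.1, [])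
  if r.2.2.length ≥ 2 then (r.1, r.2.1, st.2.2.1 ++ [p.2], st.2.2.2 ++ [r.2.2])
  else (r.1, r.2.1, st.2.2)

def obtain_train (train_sess : List (Int × Int)) (sess_clicks : List (Int × List Int)) : List Int × List (List Int) × (List (Int × Int)) :=
  let sc := PySem.Dict.ofList sess_clicks
  let r := train_sess.foldl (pvAStep sc) ((PySem.Dict.empty : PySem.Dict Int Int), (1 : Int), ([] : List Int), ([] : List (List Int)))
  (r.2.2.1, r.2.2.2, r.1.items)

-- ===== PORT B =====
-- pass-1 step: conditionally assign the next ID to item i.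
def pvBStep (st : PySem.Dict Int Int × Int) (i : Int) : PySem.Dict Int Int × Int :=
  if st.1.contains i then st else (st.1.insert i st.2, st.2 + 1)

-- pass 1: ID assignment over all sessions in order (no filtering, no output).
def pvBPass1 (sc : PySem.Dict Int (List Int)) (l : List (Int × Int))
    (st : PySem.Dict Int Int × Int) : PySem.Dict Int Int × Int :=
  l.foldl (fun st p => (sc.getD p.1 []).foldl pvBStep st) st

-- pass-2 step: remap one session through the finished dictionary, keep it if long enough.
def pvBPass2Step (sc : PySem.Dict Int (List Int)) (D : PySem.Dict Int Int)
    (acc : List Int × List (List Int)) (p : Int × Int) : List Int × List (List Int) :=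
  let outseq := (sc.getD p.1 []).map (fun i => D.getD i 0)
  if outseq.length ≥ 2 then (acc.1 ++ [p.2], acc.2 ++ [outseq]) else acc

def obtain_train_alt (train_sess : List (Int × Int)) (sess_clicks : List (Int × List Int)) : List Int × List (List Int) × (List (Int × Int)) :=
  let sc := PySem.Dict.ofList sess_clicks
  let D := (pvBPass1 sc train_sess ((PySem.Dict.empty : PySem.Dict Int Int), (1 : Int))).1
  let r := train_sess.foldl (pvBPass2Step sc D) (([] : List Int), ([] : List (List Int)))
  (r.1, r.2, D.items)

-- ===== PRECONDITION & SPEC =====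
-- Pre_ excludes exactly the inputs where A raises KeyError: a session id in train_sess
-- that is not a key of sess_clicks.
def Pre_obtain_train (train_sess : List (Int × Int)) (sess_clicks : List (Int × List Int)) : Prop :=
  ∀ p ∈ train_sess, p.1 ∈ sess_clicks.map Prod.fst
instance (train_sess : List (Int × Int)) (sess_clicks : List (Int × List Int)) : Decidable (Pre_obtain_train train_sess sess_clicks) := by unfold Pre_obtain_train; infer_instance
def pvWitness_obtain_train : (List (Int × Int)) × (List (Int × List Int)) := ([(0, 5), (1, 6)], [(0, [3, 4]), (1, [4])])

def Spec_obtain_train (train_sess : List (Int × Int)) (sess_clicks : List (Int × List Int)) (out : List Int × List (List Int) × (List (Int × Int))) : Prop := out = obtain_train_alt train_sess sess_clicks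
instance (train_sess : List (Int × Int)) (sess_clicks : List (Int × List Int)) (out : List Int × List (List Int) × (List (Int × Int))) : Decidable (Spec_obtain_train train_sess sess_clicks out) := by unfold Spec_obtain_train; infer_instance

-- ===== CLAIM (what is proved, stated in full; the proofs are below) =====
def Claim_equal_obtain_train : Prop := ∀ (train_sess : List (Int × Int)) (sess_clicks : List (Int × List Int)), Dom_obtain_train train_sess sess_clicks → Pre_obtain_train train_sess sess_clicks → Spec_obtain_train train_sess sess_clicks (obtain_train train_sess sess_clicks)

-- ===== LEMMAS AND PROOFS =====

-- one pvAInner step is pvBStep on the (dict, ctr) components plus one appended output.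
theorem pvAInner_eq (st : PySem.Dict Int Int × Int) (out : List Int) (i : Int) :
    pvAInner (st.1, st.2, out) i
      = ((pvBStep st i).1, (pvBStep st i).2, out ++ [(pvBStep st i).1.getD i 0]) := by
  by_cases h : st.1.contains i <;> simp [pvAInner, pvBStep, h]

-- pvBStep never loses an existing binding.
theorem pvBStep_mono (st : PySem.Dict Int Int × Int) (j i : Int) (v : Int)
    (h : st.1.get? i = some v) : ((pvBStep st j).1).get? i = some v := by
  by_cases hc : st.1.contains j
  · simp [pvBStep, hc, h]
  · have hij : i ≠ j := by
      intro e
      rw [PySem.Dict.contains_eq_isSome_get?] at hc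
      simp [← e, h] at hc
    simp [pvBStep, hc, PySem.Dict.get?_insert_of_ne _ _ hij, h]

theorem foldl_pvBStep_mono (l : List Int) (st : PySem.Dict Int Int × Int) (i : Int) (v : Int)
    (h : st.1.get? i = some v) : ((l.foldl pvBStep st).1).get? i = some v := by
  induction l generalizing st with
  | nil => exact h
  | cons a rest ih => exact ih _ (pvBStep_mono st a i v h)

theorem pvBPass1_mono (sc : PySem.Dict Int (List Int)) (l : List (Int × Int))
    (st : PySem.Dict Int Int × Int) (i : Int) (v : Int)
    (h : st.1.get? i = some v) : ((pvBPass1 sc l st).1).get? i = some v := by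
  induction l generalizing st with
  | nil => exact h
  | cons p rest ih => exact ih _ (foldl_pvBStep_mono _ _ i v h)

-- after pvBStep on i the dictionary binds i.
theorem pvBStep_self (st : PySem.Dict Int Int × Int) (i : Int) :
    ∃ v, ((pvBStep st i).1).get? i = some v := by
  by_cases hc : st.1.contains i
  · rw [PySem.Dict.contains_eq_isSome_get?] at hc
    obtain ⟨v, hv⟩ := Option.isSome_iff_exists.mp hc
    exact ⟨v, by simp [pvBStep, PySem.Dict.contains_eq_isSome_get?, hv]⟩
  · exact ⟨st.2, by simp [pvBStep, hc, PySem.Dict.get?_insert_self]⟩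

-- after processing a whole sequence, every clicked item is bound.
theorem foldl_pvBStep_mem (seq : List Int) (st : PySem.Dict Int Int × Int) (i : Int)
    (hi : i ∈ seq) : ∃ v, ((seq.foldl pvBStep st).1).get? i = some v := by
  induction seq generalizing st with
  | nil => cases hi
  | cons a rest ih =>
    rcases List.mem_cons.mp hi with rfl | hmem
    · by_cases hr : i ∈ rest
      · exact ih _ hr
      · obtain ⟨v, hv⟩ := pvBStep_self st i
        exact ⟨v, foldl_pvBStep_mono rest _ i v hv⟩
    · exact ih _ hmem

-- A's inner loop output = the clicks mapped through the dictionary as it stands after the loop.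
theorem pvAInner_out (seq : List Int) (st : PySem.Dict Int Int × Int) (out : List Int) :
    (seq.foldl pvAInner (st.1, st.2, out)).2.2
      = out ++ seq.map (fun i => ((seq.foldl pvBStep st).1).getD i 0) := by
  induction seq generalizing st out with
  | nil => simp
  | cons i rest ih =>
    have step := pvAInner_eq st out i
    obtain ⟨v, hv⟩ := pvBStep_self st i
    have hfin : ((rest.foldl pvBStep (pvBStep st i)).1).get? i = some v :=
      foldl_pvBStep_mono rest _ i v hv
    calc ((i :: rest).foldl pvAInner (st.1, st.2, out)).2.2
        = (rest.foldl pvAInner ((pvBStep st i).1, (pvBStep st i).2,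
            out ++ [(pvBStep st i).1.getD i 0])).2.2 := by rw [List.foldl_cons, step]
      _ = (out ++ [(pvBStep st i).1.getD i 0])
            ++ rest.map (fun j => ((rest.foldl pvBStep (pvBStep st i)).1).getD j 0) := ih _ _
      _ = out ++ ((i :: rest).map (fun j => (((i :: rest).foldl pvBStep st).1).getD j 0)) := by
          simp [List.foldl_cons, PySem.Dict.getD_of_get?_eq_some _ _ hv,
                PySem.Dict.getD_of_get?_eq_some _ _ hfin, List.append_assoc]

-- and that dictionary may be replaced by any later (larger) one.
theorem pvAInner_out_final (seq : List Int) (st : PySem.Dict Int Int × Int)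
    (D : PySem.Dict Int Int)
    (hD : ∀ i v, ((seq.foldl pvBStep st).1).get? i = some v → D.get? i = some v) :
    (seq.foldl pvAInner (st.1, st.2, [])).2.2 = seq.map (fun i => D.getD i 0) := by
  rw [pvAInner_out, List.nil_append]
  refine List.map_congr_left (fun i hi => ?_)
  obtain ⟨v, hv⟩ := foldl_pvBStep_mem seq st i hi
  rw [PySem.Dict.getD_of_get?_eq_some _ _ hv,
      PySem.Dict.getD_of_get?_eq_some _ _ (hD i v hv)]

-- the (dict, ctr) projection of A's inner loop is exactly pvBStep folded.
theorem pvAInner_proj (seq : List Int) (st : PySem.Dict Int Int × Int) (out : List Int) :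
    ((seq.foldl pvAInner (st.1, st.2, out)).1, (seq.foldl pvAInner (st.1, st.2, out)).2.1)
      = seq.foldl pvBStep st := by
  induction seq generalizing st out with
  | nil => simp
  | cons i rest ih =>
    rw [List.foldl_cons, pvAInner_eq st out i, List.foldl_cons]
    exact ih (pvBStep st i) _

-- main outer invariant: A's loop from any state splits into pass 1 and pass 2.
theorem pvOuter (sc : PySem.Dict Int (List Int)) (l : List (Int × Int))
    (st : PySem.Dict Int Int × Int) (acc : List Int × List (List Int))
    (D : PySem.Dict Int Int)
    (hD : ∀ i v, ((pvBPass1 sc l st).1).get? i = some v → D.get? i = some v) :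
    l.foldl (pvAStep sc) (st.1, st.2, acc)
      = ((pvBPass1 sc l st).1, (pvBPass1 sc l st).2, l.foldl (pvBPass2Step sc D) acc) := by
  induction l generalizing st acc with
  | nil => simp [pvBPass1]
  | cons p rest ih =>
    have hseq : pvBPass1 sc (p :: rest) st
        = pvBPass1 sc rest ((sc.getD p.1 []).foldl pvBStep st) := by
      simp [pvBPass1]
    rw [hseq] at hD ⊢
    set seq := sc.getD p.1 [] with hs
    have hout : (seq.foldl pvAInner (st.1, st.2, [])).2.2 = seq.map (fun i => D.getD i 0) := by
      refine pvAInner_out_final seq st D (fun i v hv => hD i v ?_)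
      exact pvBPass1_mono sc rest _ i v hv
    have hproj := pvAInner_proj seq st []
    have hstep : pvAStep sc (st.1, st.2, acc) p
        = ((seq.foldl pvBStep st).1, (seq.foldl pvBStep st).2, pvBPass2Step sc D acc p) := by
      simp only [pvAStep, pvBPass2Step, ← hs, ← hproj, hout]
      split <;> rfl
    rw [List.foldl_cons, hstep, List.foldl_cons]
    exact ih _ _ hD

-- ===== VERDICT (by name: the statement is the Claim_ definition above) =====
theorem obtain_train_spec : Claim_equal_obtain_train := by
  intro train_sess sess_clicks _ _
  unfold Spec_obtain_train obtain_train obtain_train_alt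
  have h := pvOuter (PySem.Dict.ofList sess_clicks) train_sess
      ((PySem.Dict.empty : PySem.Dict Int Int), (1 : Int)) ([], [])
      (pvBPass1 (PySem.Dict.ofList sess_clicks) train_sess
        ((PySem.Dict.empty : PySem.Dict Int Int), (1 : Int))).1
      (fun _ _ hv => hv)
  simp only [h]
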